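-- pv_equiv track=rewrite | github.com/ohmema/interview | python/interviews/Array/sprintTraining.py | getMostVisited
-- ===== SOURCE A (Python) =====
-- def getMostVisited(n, sprints):
--     range_sprints = []
--     for i in range(1, len(sprints)):
--         a = min(sprints[i-1], sprints[i])
--         b = max(sprints[i-1], sprints[i])
--         range_sprints.append(range(a, b+1))
--
--     m = (0, 0)
--
--     for i in range(1, n+1):
--         p = 0;
--         for r in range_sprints:
--             if i in r:
--                 p += 1
--
--         m = (p, i) if m[0] < p else m
--
--     return m[1]
-- ===== SOURCE B (Python) =====
-- def getMostVisited(n, sprints):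
--     # difference array (sparse) + prefix-sum sweep: O(n + k) instead of A's O(n * k)
--     diff = {}
--     for lo, hi in zip(sprints, sprints[1:]):
--         if lo > hi:
--             lo, hi = hi, lo
--         lo = max(lo, 1)
--         hi = min(hi, n)
--         if lo <= hi:
--             diff[lo] = diff.get(lo, 0) + 1
--             diff[hi + 1] = diff.get(hi + 1, 0) - 1
--     best_count = 0
--     best_pos = 0
--     cur = 0
--     for i in range(1, n + 1):
--         cur += diff.get(i, 0)
--         if cur > best_count:
--             best_count = cur
--             best_pos = i
--     return best_pos
-- ===== Notes on version B (the rewrite author's own statement) =====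
-- stated objective: faster
-- what changed: Replaces A's rescan of every interval for each of the n positions with a sparse difference array built once from the consecutive sprint pairs and a single prefix-sum sweep that tracks the earliest maximum.
import Mathlib
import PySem

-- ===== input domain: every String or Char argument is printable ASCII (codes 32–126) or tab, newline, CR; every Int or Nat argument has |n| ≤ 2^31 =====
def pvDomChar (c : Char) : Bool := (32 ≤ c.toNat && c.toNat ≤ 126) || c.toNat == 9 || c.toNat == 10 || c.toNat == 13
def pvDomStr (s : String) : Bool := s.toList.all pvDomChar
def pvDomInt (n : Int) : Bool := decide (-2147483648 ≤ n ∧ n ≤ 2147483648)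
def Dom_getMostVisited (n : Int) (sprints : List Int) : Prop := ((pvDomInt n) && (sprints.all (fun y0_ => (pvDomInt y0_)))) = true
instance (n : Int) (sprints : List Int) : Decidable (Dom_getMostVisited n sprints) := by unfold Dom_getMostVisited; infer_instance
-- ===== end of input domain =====

-- B replaces A's per-position rescan of all intervals (O(n·k)) by a sparse difference
-- array with a single prefix-sum sweep (O(n + k)); same earliest-most-covered position.

-- ===== PORT A =====
-- range(a, b+1) is stored as the pair (a, b+1); 'i in r' is r.1 ≤ i < r.2 (exact for int ranges with step 1)
def getMostVisited (n : Int) (sprints : List Int) : Int :=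
  let range_sprints : List (Int × Int) :=
    (PySem.List.pyRange 1 (sprints.length : Int) 1).foldl (fun acc i =>
      let a := min (PySem.List.pyGetD sprints (i - 1) 0) (PySem.List.pyGetD sprints i 0)
      let b := max (PySem.List.pyGetD sprints (i - 1) 0) (PySem.List.pyGetD sprints i 0)
      acc ++ [(a, b + 1)]) []
  let m := (PySem.List.pyRange 1 (n + 1) 1).foldl (fun m i =>
      let p := range_sprints.foldl (fun p r => if r.1 ≤ i ∧ i < r.2 then p + 1 else p) (0 : Int)
      if m.1 < p then (p, i) else m) ((0 : Int), (0 : Int))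
  m.2

-- ===== PORT B =====
-- one dict update for one consecutive pair (the body of Source B's first loop)
def pvDiffStep (n : Int) (d : PySem.Dict Int Int) (q : Int × Int) : PySem.Dict Int Int :=
  let lo0 := if q.1 > q.2 then q.2 else q.1
  let hi0 := if q.1 > q.2 then q.1 else q.2
  let lo := max lo0 1
  let hi := min hi0 n
  if lo ≤ hi then
    let d1 := d.insert lo (d.getD lo 0 + 1)
    d1.insert (hi + 1) (d1.getD (hi + 1) 0 - 1)
  else d

def getMostVisited_alt (n : Int) (sprints : List Int) : Int :=
  let diff : PySem.Dict Int Int :=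
    (sprints.zip (PySem.List.slice sprints (some 1) none)).foldl (pvDiffStep n) PySem.Dict.empty
  let st := (PySem.List.pyRange 1 (n + 1) 1).foldl (fun s i =>
      let cur := s.2.2 + diff.getD i 0
      if cur > s.1 then (cur, i, cur) else (s.1, s.2.1, cur))
      ((0 : Int), (0 : Int), (0 : Int))
  st.2.1

-- ===== PRECONDITION & SPEC =====
def Spec_getMostVisited (n : Int) (sprints : List Int) (out : Int) : Prop := out = getMostVisited_alt n sprints
instance (n : Int) (sprints : List Int) (out : Int) : Decidable (Spec_getMostVisited n sprints out) := by unfold Spec_getMostVisited; infer_instance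

-- ===== CLAIM (what is proved, stated in full; the proofs are below) =====
def Claim_equal_getMostVisited : Prop := ∀ (n : Int) (sprints : List Int), Dom_getMostVisited n sprints → Spec_getMostVisited n sprints (getMostVisited n sprints)

-- ===== LEMMAS AND PROOFS =====

-- consecutive pairs of sprints
def pvPairs (sprints : List Int) : List (Int × Int) := sprints.zip (sprints.drop 1)

-- number of intervals covering position i
def pvCnt (qs : List (Int × Int)) (i : Int) : Int :=
  (qs.countP (fun q => decide (min q.1 q.2 ≤ i ∧ i ≤ max q.1 q.2)) : Int)

-- contribution of one pair to the difference array at key k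
def pvDelta (n : Int) (q : Int × Int) (k : Int) : Int :=
  let lo := max (min q.1 q.2) 1
  let hi := min (max q.1 q.2) n
  if lo ≤ hi then (if k = lo then 1 else 0) + (if k = hi + 1 then (-1 : Int) else 0) else 0

-- prefix sum of the difference dict up to i
def pvC (n : Int) (qs : List (Int × Int)) (i : Int) : Int :=
  ((PySem.List.pyRange 1 (i + 1) 1).map
    (fun k => (qs.foldl (pvDiffStep n) PySem.Dict.empty).getD k 0)).sum

lemma pv_consecutive {β : Type} (g : Int → Int → β) (xs : List Int) :
    (PySem.List.pyRange 1 (xs.length : Int) 1).map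
      (fun i => g (PySem.List.pyGetD xs (i - 1) 0) (PySem.List.pyGetD xs i 0))
    = (xs.zip (xs.drop 1)).map (fun q => g q.1 q.2) := by
  apply List.ext_getElem
  · simp [PySem.List.length_pyRange_one]
  · intro k h1 h2
    have hk : k < xs.length - 1 := by
      simpa [PySem.List.length_pyRange_one] using h1
    have hk1 : k < xs.length := by omega
    have hk2 : k + 1 < xs.length := by omega
    simp only [List.getElem_map, PySem.List.getElem_pyRange_one, List.getElem_zip,
      List.getElem_drop]
    have e1 : (1 : Int) + (k : Int) - 1 = ((k : Nat) : Int) := by ring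
    have e2 : (1 : Int) + (k : Int) = (((k + 1 : Nat)) : Int) := by push_cast; ring
    rw [e1, e2, PySem.List.pyGetD_natCast, PySem.List.pyGetD_natCast,
      List.getD_eq_getElem _ _ hk1, List.getD_eq_getElem _ _ hk2]
    simp [Nat.add_comm]

lemma pv_dict_getD (n : Int) (l : List (Int × Int)) (d : PySem.Dict Int Int) (k : Int) :
    (l.foldl (pvDiffStep n) d).getD k 0 = d.getD k 0 + (l.map (fun q => pvDelta n q k)).sum := by
  induction l generalizing d with
  | nil => simp
  | cons q t ih =>
    simp only [List.foldl_cons, List.map_cons, List.sum_cons, ih]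
    have hstep : (pvDiffStep n d q).getD k 0 = d.getD k 0 + pvDelta n q k := by
      unfold pvDiffStep pvDelta
      have hmin : (if q.1 > q.2 then q.2 else q.1) = min q.1 q.2 := by
        split_ifs <;> omega
      have hmax : (if q.1 > q.2 then q.1 else q.2) = max q.1 q.2 := by
        split_ifs <;> omega
      simp only [hmin, hmax]
      by_cases hlh : max (min q.1 q.2) 1 ≤ min (max q.1 q.2) n
      · rw [if_pos hlh, if_pos hlh]
        simp only [PySem.Dict.getD_insert]
        split_ifs <;> (try subst k) <;> omega
      · rw [if_neg hlh, if_neg hlh]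
        omega
    rw [hstep]
    ring

lemma pv_ind_sum (r : List Int) (c y : Int) (h : r.Nodup) :
    (r.map (fun k => if k = c then y else 0)).sum = if c ∈ r then y else 0 := by
  induction r with
  | nil => simp
  | cons a t ih =>
    rcases List.nodup_cons.mp h with ⟨ha, ht⟩
    simp only [List.map_cons, List.sum_cons, List.mem_cons, ih ht]
    by_cases hc : c = a
    · subst hc
      simp [ha]
    · rw [if_neg (fun h => hc h.symm)]
      simp [hc]

lemma pv_swap (l : List (Int × Int)) (r : List Int) (f : (Int × Int) → Int → Int) :
    (r.map (fun k => (l.map (fun q => f q k)).sum)).sum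
    = (l.map (fun q => (r.map (f q)).sum)).sum := by
  induction l with
  | nil => simp
  | cons q t ih =>
    simp only [List.map_cons, List.sum_cons]
    rw [PySem.List.sum_map_add_int r (fun k => f q k) (fun k => (t.map (fun q' => f q' k)).sum), ih]

lemma pv_pair_sum (n : Int) (q : Int × Int) (i : Int) (h1 : 1 ≤ i) (h2 : i ≤ n) :
    ((PySem.List.pyRange 1 (i + 1) 1).map (pvDelta n q)).sum
    = if min q.1 q.2 ≤ i ∧ i ≤ max q.1 q.2 then 1 else 0 := by
  unfold pvDelta
  by_cases hlh : max (min q.1 q.2) 1 ≤ min (max q.1 q.2) n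
  · simp only [if_pos hlh]
    rw [PySem.List.sum_map_add_int]
    rw [pv_ind_sum _ _ _ (PySem.List.nodup_pyRange_one 1 (i + 1)),
        pv_ind_sum _ _ _ (PySem.List.nodup_pyRange_one 1 (i + 1))]
    simp only [PySem.List.mem_pyRange_one]
    split_ifs <;> omega
  · simp only [if_neg hlh]
    simp only [List.map_const']
    rw [List.sum_replicate]
    split_ifs with h
    · omega
    · simp

lemma pv_C_eq_cnt (n : Int) (qs : List (Int × Int)) (i : Int) (h1 : 1 ≤ i) (h2 : i ≤ n) :
    pvC n qs i = pvCnt qs i := by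
  unfold pvC
  have hd : ∀ k : Int, (qs.foldl (pvDiffStep n) PySem.Dict.empty).getD k 0
      = (qs.map (fun q => pvDelta n q k)).sum := by
    intro k
    rw [pv_dict_getD]
    simp
  simp only [hd]
  rw [pv_swap]
  have hmc : qs.map (fun q => ((PySem.List.pyRange 1 (i + 1) 1).map (pvDelta n q)).sum)
      = qs.map (fun q => if (decide (min q.1 q.2 ≤ i ∧ i ≤ max q.1 q.2)) = true then (1 : Int) else 0) := by
    apply List.map_congr_left
    intro q _
    rw [pv_pair_sum n q i h1 h2]
    simp
  rw [hmc, PySem.List.sum_map_ite_one_zero]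
  rfl

lemma pv_C_succ (n : Int) (qs : List (Int × Int)) (i : Int) (h1 : 1 ≤ i) :
    pvC n qs i = pvC n qs (i - 1)
      + (qs.foldl (pvDiffStep n) PySem.Dict.empty).getD i 0 := by
  unfold pvC
  have h : i = (i - 1) + 1 := by omega
  rw [h, PySem.List.pyRange_one_succ_right (by omega : (1:Int) ≤ i - 1 + 1)]
  simp only [List.map_append, List.sum_append, List.map_cons, List.sum_cons, List.map_nil,
    List.sum_nil]
  ring_nf

lemma pv_inner (qs : List (Int × Int)) (i : Int) :
    ((qs.map (fun q => (min q.1 q.2, max q.1 q.2 + 1))).foldl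
      (fun p r => if r.1 ≤ i ∧ i < r.2 then p + 1 else p) (0 : Int)) = pvCnt qs i := by
  rw [PySem.List.foldl_ite_add_one (fun (r : Int × Int) => r.1 ≤ i ∧ i < r.2)
      ((qs.map (fun q => (min q.1 q.2, max q.1 q.2 + 1)))) 0]
  rw [List.countP_map]
  unfold pvCnt
  rw [zero_add]
  congr 1
  apply List.countP_congr
  intro q _
  simp only [Function.comp_apply, decide_eq_true_eq]
  omega

lemma pv_loop (n : Int) (qs : List (Int × Int)) (k : Nat) :
    ∀ (a b p : Int), (n + 1 - a).toNat = k → 1 ≤ a →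
    (((PySem.List.pyRange a (n + 1) 1).foldl (fun s i =>
        if s.2.2 + (qs.foldl (pvDiffStep n) PySem.Dict.empty).getD i 0 > s.1
        then (s.2.2 + (qs.foldl (pvDiffStep n) PySem.Dict.empty).getD i 0, i,
              s.2.2 + (qs.foldl (pvDiffStep n) PySem.Dict.empty).getD i 0)
        else (s.1, s.2.1, s.2.2 + (qs.foldl (pvDiffStep n) PySem.Dict.empty).getD i 0))
        (b, p, pvC n qs (a - 1))).2.1
    = ((PySem.List.pyRange a (n + 1) 1).foldl (fun m i =>
        if m.1 < pvCnt qs i then (pvCnt qs i, i) else m) (b, p)).2) := by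
  induction k with
  | zero =>
    intro a b p hk ha
    rw [PySem.List.pyRange_one_eq_nil (by omega)]
    rfl
  | succ j ih =>
    intro a b p hk ha
    have hab : a < n + 1 := by omega
    rw [PySem.List.pyRange_one_cons hab]
    simp only [List.foldl_cons]
    have hcur : pvC n qs (a - 1) + (qs.foldl (pvDiffStep n) PySem.Dict.empty).getD a 0
        = pvC n qs a := (pv_C_succ n qs a ha).symm
    have hcnt : pvC n qs a = pvCnt qs a := pv_C_eq_cnt n qs a ha (by omega)
    simp only [hcur, hcnt]
    by_cases hb : pvCnt qs a > b
    · rw [if_pos hb, if_pos hb]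
      have h3 := ih (a + 1) (pvCnt qs a) a (by omega) (by omega)
      rw [show a + 1 - 1 = a by ring, hcnt] at h3
      exact h3
    · rw [if_neg hb, if_neg hb]
      have h3 := ih (a + 1) b p (by omega) (by omega)
      rw [show a + 1 - 1 = a by ring, hcnt] at h3
      exact h3

-- ===== VERDICT (by name: the statement is the Claim_ definition above) =====
theorem getMostVisited_spec : Claim_equal_getMostVisited := by
  intro n sprints _
  unfold Spec_getMostVisited
  have hA : getMostVisited n sprints
      = ((PySem.List.pyRange 1 (n + 1) 1).foldl
          (fun m i => if m.1 < pvCnt (pvPairs sprints) i then (pvCnt (pvPairs sprints) i, i) else m)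
          ((0 : Int), (0 : Int))).2 := by
    simp only [getMostVisited]
    rw [PySem.List.foldl_append_singleton_eq_map
        (fun i => (min (PySem.List.pyGetD sprints (i - 1) 0) (PySem.List.pyGetD sprints i 0),
                   max (PySem.List.pyGetD sprints (i - 1) 0) (PySem.List.pyGetD sprints i 0) + 1)),
        List.nil_append,
        pv_consecutive (fun x y => (min x y, max x y + 1)) sprints]
    have hfun : (fun (m : Int × Int) (i : Int) =>
        if m.1 < ((sprints.zip (sprints.drop 1)).map (fun q => (min q.1 q.2, max q.1 q.2 + 1))).foldl
            (fun p r => if r.1 ≤ i ∧ i < r.2 then p + 1 else p) (0 : Int)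
        then (((sprints.zip (sprints.drop 1)).map (fun q => (min q.1 q.2, max q.1 q.2 + 1))).foldl
            (fun p r => if r.1 ≤ i ∧ i < r.2 then p + 1 else p) (0 : Int), i) else m)
        = (fun (m : Int × Int) (i : Int) =>
            if m.1 < pvCnt (pvPairs sprints) i then (pvCnt (pvPairs sprints) i, i) else m) := by
      funext m i
      rw [pv_inner (sprints.zip (sprints.drop 1)) i]
      rfl
    rw [hfun]
  have hq0 : PySem.List.slice sprints (some 1) none = sprints.drop 1 := by
    rw [PySem.List.slice_from_one, List.drop_one]
  have hC0 : pvC n (pvPairs sprints) (1 - 1) = 0 := by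
    unfold pvC
    norm_num [PySem.List.pyRange_one_eq_nil]
  have hloop := pv_loop n (pvPairs sprints) (n + 1 - 1).toNat 1 0 0 rfl (le_refl 1)
  rw [hC0] at hloop
  rw [hA]
  simp only [getMostVisited_alt, hq0]
  exact hloop.symm
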